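-- pv_equiv track=rewrite | github.com/iamgarvit/basic-practice-qs | CodeForces 1/1872A.py | func
-- ===== SOURCE A (Python) =====
-- def func(a,b,c):
--     if(a>b):
--         count=0
--         while(a>b):
--             if(a-c>=b):
--                 a=a-c
--                 b=b+c
--                 count+=1
--             else:
--                 for i in range(c,0,-1):
--                     if(a-i>=b):
--                         a=a-i
--                         b=b+i
--                         count+=1
--         return(count)
--     else:
--         count=0
--         while(b>a):
--             if(b-c>=a):
--                 b=b-c
--                 a=a+c
--                 count+=1
--             else:
--                 for i in range(c,0,-1):
--                     if(b-i>=a):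
--                         b=b-i
--                         a=a+i
--                         count+=1
--         return(count)
-- ===== SOURCE B (Python) =====
-- def func(a, b, c):
--     g = abs(a - b)
--     if g == 0:
--         return 0
--     # ceil(g / (2*c)): each full step moves c each way (gap -2c), the last partial step finishes
--     return -(-g // (2 * c))
-- ===== Notes on version B (the rewrite author's own statement) =====
-- stated objective: faster
-- what changed: Replaced A's step-by-step while-loop simulation (with an inner countdown scan for the final partial transfer) by the closed-form ceiling division ceil(|a-b|/(2c)).
import Mathlib
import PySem

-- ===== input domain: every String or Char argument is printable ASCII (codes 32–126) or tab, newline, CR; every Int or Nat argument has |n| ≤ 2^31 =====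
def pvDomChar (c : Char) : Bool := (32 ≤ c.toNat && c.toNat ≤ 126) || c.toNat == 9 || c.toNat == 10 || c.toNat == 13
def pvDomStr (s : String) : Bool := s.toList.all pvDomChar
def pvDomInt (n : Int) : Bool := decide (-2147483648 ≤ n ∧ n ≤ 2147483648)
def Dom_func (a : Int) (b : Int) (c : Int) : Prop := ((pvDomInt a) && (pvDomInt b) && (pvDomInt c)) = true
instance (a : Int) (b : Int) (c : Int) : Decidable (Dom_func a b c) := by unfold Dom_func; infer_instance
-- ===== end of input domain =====

-- B replaces A's step-by-step rebalancing simulation with the closed form ceil(|a-b|/(2c)) (faster: O(1) vs O(|a-b|/c + c)).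

-- ===== PORT A =====
-- inner 'for i in range(c,0,-1)' of the a>b branch, threading the mutable state (a, b, count)
def pvInnerA : List Int → Int → Int → Int → Int × Int × Int
  | [], a, b, count => (a, b, count)
  | i :: rest, a, b, count =>
      if a - i ≥ b then pvInnerA rest (a - i) (b + i) (count + 1)
      else pvInnerA rest a b count

-- the 'while(a>b)' loop; fuel only makes the recursion total (A diverges when a ≠ b and c ≤ 0)
def pvLoopA : Nat → Int → Int → Int → Int → Int
  | 0, _, _, _, count => count
  | fuel + 1, a, b, c, count =>
      if a > b then
        if a - c ≥ b then pvLoopA fuel (a - c) (b + c) c (count + 1)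
        else
          let s := pvInnerA (PySem.List.pyRange c 0 (-1)) a b count
          pvLoopA fuel s.1 s.2.1 c s.2.2
      else count

-- inner 'for i in range(c,0,-1)' of the else branch (b>a)
def pvInnerB : List Int → Int → Int → Int → Int × Int × Int
  | [], a, b, count => (a, b, count)
  | i :: rest, a, b, count =>
      if b - i ≥ a then pvInnerB rest (a + i) (b - i) (count + 1)
      else pvInnerB rest a b count

-- the 'while(b>a)' loop
def pvLoopB : Nat → Int → Int → Int → Int → Int
  | 0, _, _, _, count => count
  | fuel + 1, a, b, c, count =>
      if b > a then
        if b - c ≥ a then pvLoopB fuel (a + c) (b - c) c (count + 1)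
        else
          let s := pvInnerB (PySem.List.pyRange c 0 (-1)) a b count
          pvLoopB fuel s.1 s.2.1 c s.2.2
      else count

def func (a : Int) (b : Int) (c : Int) : Int :=
  if a > b then pvLoopA ((a - b).toNat + 1) a b c 0
  else pvLoopB ((b - a).toNat + 1) a b c 0

-- ===== PORT B =====
def func_alt (a : Int) (b : Int) (c : Int) : Int :=
  let g : Int := |a - b|
  if g = 0 then 0
  else -(PySem.Int.floordiv (-g) (2 * c))

-- ===== PRECONDITION & SPEC =====
-- Pre_ excludes exactly the inputs where A never returns: with a ≠ b and c ≤ 0 the while loop makes no progress (A diverges).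
def Pre_func (a : Int) (b : Int) (c : Int) : Prop := a = b ∨ 1 ≤ c
instance (a : Int) (b : Int) (c : Int) : Decidable (Pre_func a b c) := by unfold Pre_func; infer_instance
def pvWitness_func : Int × Int × Int := (7, 2, 2)

def Spec_func (a : Int) (b : Int) (c : Int) (out : Int) : Prop := out = func_alt a b c
instance (a : Int) (b : Int) (c : Int) (out : Int) : Decidable (Spec_func a b c out) := by unfold Spec_func; infer_instance

-- ===== CLAIM (what is proved, stated in full; the proofs are below) =====
def Claim_equal_func : Prop := ∀ (a : Int) (b : Int) (c : Int), Dom_func a b c → Pre_func a b c → Spec_func a b c (func a b c)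

-- ===== LEMMAS AND PROOFS =====

-- number of remaining steps for a gap g with transfer size c (B's formula, extended by 0 for g ≤ 0)
def pvN (g : Int) (c : Int) : Int := if g ≤ 0 then 0 else -(PySem.Int.floordiv (-g) (2 * c))

lemma pvN_step (g c : Int) (hc : 1 ≤ c) (hg : 1 ≤ g) : pvN g c = 1 + pvN (g - 2 * c) c := by
  have hb : (0:Int) < 2 * c := by omega
  by_cases h2 : g - 2 * c ≤ 0
  · have h1 : -(PySem.Int.floordiv (-g) (2 * c)) = 1 :=
      (PySem.Int.neg_floordiv_neg_eq_iff_of_pos hb).mpr (by constructor <;> nlinarith)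
    unfold pvN
    rw [if_neg (show ¬ g ≤ 0 by omega), if_pos h2, h1]
    norm_num
  · set q := -(PySem.Int.floordiv (-g) (2 * c)) with hq
    have hbounds : (q - 1) * (2 * c) < g ∧ g ≤ q * (2 * c) :=
      (PySem.Int.neg_floordiv_neg_eq_iff_of_pos hb).mp rfl
    have h1 : -(PySem.Int.floordiv (-(g - 2 * c)) (2 * c)) = q - 1 :=
      (PySem.Int.neg_floordiv_neg_eq_iff_of_pos hb).mpr
        ⟨by nlinarith [hbounds.1], by nlinarith [hbounds.2]⟩
    unfold pvN
    rw [if_neg (show ¬ g ≤ 0 by omega), if_neg h2, h1]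
    ring

-- the inner countdown loop is the identity once the gap is closed (a ≤ b)
lemma pvInnerA_nofire : ∀ (n : Nat) (m a b count : Int), m.toNat ≤ n → a ≤ b →
    pvInnerA (PySem.List.pyRange m 0 (-1)) a b count = (a, b, count) := by
  intro n
  induction n with
  | zero =>
    intro m a b count hm hab
    rw [PySem.List.pyRange_neg_one_eq_nil (by omega)]
    rfl
  | succ n ih =>
    intro m a b count hm hab
    by_cases h0 : m ≤ 0
    · rw [PySem.List.pyRange_neg_one_eq_nil h0]; rfl
    · rw [PySem.List.pyRange_neg_one_cons (by omega : (0:Int) < m)]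
      have : ¬ a - m ≥ b := by omega
      simp only [pvInnerA, if_neg this]
      exact ih (m - 1) a b count (by omega) hab

-- with 1 ≤ a - b ≤ m the inner loop fires exactly once, at i = a - b, swapping a and b
lemma pvInnerA_fire : ∀ (n : Nat) (m a b count : Int), m.toNat ≤ n → 1 ≤ a - b → a - b ≤ m →
    pvInnerA (PySem.List.pyRange m 0 (-1)) a b count = (b, a, count + 1) := by
  intro n
  induction n with
  | zero => intro m a b count hm h1 h2; omega
  | succ n ih =>
    intro m a b count hm h1 h2
    rw [PySem.List.pyRange_neg_one_cons (by omega : (0:Int) < m)]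
    by_cases hf : a - m ≥ b
    · have hm' : m = a - b := by omega
      simp only [pvInnerA, if_pos hf]
      have := pvInnerA_nofire n (m - 1) (a - m) (b + m) (count + 1) (by omega) (by omega)
      rw [this]
      simp only [Prod.mk.injEq]
      exact ⟨by omega, by omega, trivial⟩
    · simp only [pvInnerA, if_neg hf]
      exact ih (m - 1) a b count (by omega) h1 (by omega)

lemma pvLoopA_eq : ∀ (n : Nat) (a b c count : Int), 1 ≤ c → (a - b).toNat ≤ n →
    pvLoopA n a b c count = count + pvN (a - b) c := by
  intro n
  induction n with
  | zero =>
    intro a b c count hc hn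
    have : a - b ≤ 0 := by omega
    simp [pvLoopA, pvN, this]
  | succ n ih =>
    intro a b c count hc hn
    by_cases hab : a > b
    · by_cases hfull : a - c ≥ b
      · simp only [pvLoopA, if_pos hab, if_pos hfull]
        rw [ih (a - c) (b + c) c (count + 1) hc (by omega)]
        rw [pvN_step (a - b) c hc (by omega)]
        have : a - c - (b + c) = a - b - 2 * c := by ring
        rw [this]; ring
      · simp only [pvLoopA, if_pos hab, if_neg hfull]
        rw [pvInnerA_fire (c.toNat) c a b count (le_refl _) (by omega) (by omega)]
        simp only
        rw [ih b a c (count + 1) hc (by omega)]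
        have hz : pvN (b - a) c = 0 := by simp [pvN]; omega
        rw [hz, pvN_step (a - b) c hc (by omega)]
        have : pvN (a - b - 2 * c) c = 0 := by simp [pvN]; omega
        rw [this]; ring
    · have : a - b ≤ 0 := by omega
      simp [pvLoopA, hab, pvN, this]

-- the b > a branch is the a > b branch with the roles of a and b swapped
lemma pvInnerB_swap : ∀ (l : List Int) (a b count : Int),
    pvInnerB l a b count = (let s := pvInnerA l b a count; (s.2.1, s.1, s.2.2)) := by
  intro l
  induction l with
  | nil => intro a b count; rfl
  | cons i rest ih =>
    intro a b count
    simp only [pvInnerB, pvInnerA]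
    by_cases h : b - i ≥ a
    · rw [if_pos h, if_pos h, ih]
    · rw [if_neg h, if_neg h, ih]

lemma pvLoopB_swap : ∀ (n : Nat) (a b c count : Int),
    pvLoopB n a b c count = pvLoopA n b a c count := by
  intro n
  induction n with
  | zero => intro a b c count; rfl
  | succ n ih =>
    intro a b c count
    simp only [pvLoopB, pvLoopA]
    by_cases h1 : b > a
    · rw [if_pos h1, if_pos h1]
      by_cases h2 : b - c ≥ a
      · rw [if_pos h2, if_pos h2, ih]
      · rw [if_neg h2, if_neg h2, pvInnerB_swap, ih]
    · rw [if_neg h1, if_neg h1]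

-- ===== VERDICT (by name: the statement is the Claim_ definition above) =====
theorem func_spec : Claim_equal_func := by
  intro a b c _ hpre
  show func a b c = func_alt a b c
  rcases hpre with heq | hc
  · subst heq
    simp [func, pvLoopB, func_alt]
  · unfold func func_alt
    by_cases hab : a > b
    · rw [if_pos hab, pvLoopA_eq ((a - b).toNat + 1) a b c 0 hc (by omega), zero_add]
      have habs : |a - b| = a - b := abs_of_pos (by omega)
      unfold pvN
      rw [if_neg (show ¬ a - b ≤ 0 by omega)]
      simp only [habs]
      rw [if_neg (show ¬ (a - b) = 0 by omega)]
    · rw [if_neg hab, pvLoopB_swap, pvLoopA_eq ((b - a).toNat + 1) b a c 0 hc (by omega), zero_add]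
      by_cases heq : b = a
      · subst heq
        simp [pvN]
      · have habs : |a - b| = b - a := by rw [abs_sub_comm]; exact abs_of_pos (by omega)
        unfold pvN
        rw [if_neg (show ¬ b - a ≤ 0 by omega)]
        simp only [habs]
        rw [if_neg (show ¬ (b - a) = 0 by omega)]
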